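-- pv_equiv track=rewrite | github.com/NingMiao/SelfCheck | src/utils.py | transform2verifierformat
-- ===== SOURCE A (Python) =====
-- def transform2verifierformat(output):
--     l=len(output)
--     evidence_start_id=-1
--     evidence_end_id=-1
--     conclusion_start_id=-1
--     conclusion_end_id=-1
--
--     for i in range(l):
--         if output[i]=='[':
--             evidence_start_id=i
--             break
--     for i in range(evidence_start_id+1, l):
--         if output[i]==']':
--             evidence_end_id=i
--             break
--     for i in range(evidence_end_id+1, l):
--         if output[i]=='<':
--             conclusion_start_id=i
--             break
--     for i in range(conclusion_start_id+1, l):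
--         if output[i]=='>':
--             conclusion_end_id=i
--             break
--
--     if evidence_start_id==-1 or evidence_end_id==-1 or conclusion_start_id==-1 or conclusion_end_id==-1:
--         return ''
--     else:
--         evidence=output[evidence_start_id: evidence_end_id+1]
--         conclusion=output[conclusion_start_id: conclusion_end_id+1]
--         return 'can we draw the conclusion that '+conclusion+' from evidences '+evidence+'?'
-- ===== SOURCE B (Python) =====
-- import re
--
-- _PAT = re.compile(r'(\[[^\]]*\])[\s\S]*?(<[^>]*>)')
--
-- def transform2verifierformat(output):
--     m = _PAT.search(output)
--     if m is None:
--         return ''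
--     return ('can we draw the conclusion that ' + m.group(2)
--             + ' from evidences ' + m.group(1) + '?')
-- ===== Notes on version B (the rewrite author's own statement) =====
-- stated objective: idiomatic
-- what changed: Replaced the four sequential sentinel-index scanning loops with a single regex search, re.search(r'(\[[^\]]*\])[\s\S]*?(<[^>]*>)'), whose two capturing groups yield the evidence and conclusion directly.
import Mathlib
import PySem

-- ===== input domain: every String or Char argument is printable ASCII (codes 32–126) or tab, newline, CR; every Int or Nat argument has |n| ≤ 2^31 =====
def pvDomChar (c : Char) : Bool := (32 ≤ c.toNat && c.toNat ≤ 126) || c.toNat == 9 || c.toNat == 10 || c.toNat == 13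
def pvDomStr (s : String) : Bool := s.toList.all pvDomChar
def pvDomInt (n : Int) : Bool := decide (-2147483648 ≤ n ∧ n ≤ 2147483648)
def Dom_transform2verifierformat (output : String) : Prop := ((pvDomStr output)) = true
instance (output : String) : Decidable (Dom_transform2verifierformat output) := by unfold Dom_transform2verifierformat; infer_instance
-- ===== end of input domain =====

-- B replaces A's four fixed scanning loops by one regex search,
-- re.search(r'(\[[^\]]*\])[\s\S]*?(<[^>]*>)', output), ported below as the
-- backtracking matcher this pattern denotes (try each start position left to
-- right; lazy gap). Objective: idiomatic; A is total and B returns A's value.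

-- ===== PORT A =====
-- 'for i in range(start, l): if output[i]==t: <id>=i; break' — first index ≥ start
-- holding t, else the sentinel -1 stays (exact: the loop body only reads output[i], i < l).
def pvFindLoopA (cs : List Char) (t : Char) (i : Nat) : Int :=
  if h : i < cs.length then
    if cs[i] = t then (i : Int) else pvFindLoopA cs t (i + 1)
  else -1
termination_by cs.length - i

def transform2verifierformat (output : String) : String :=
  let cs := output.toList
  let evidenceStartId := pvFindLoopA cs '[' 0
  let evidenceEndId := pvFindLoopA cs ']' (evidenceStartId + 1).toNat  -- start ≥ -1+1 = 0, so .toNat is exact here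
  let conclusionStartId := pvFindLoopA cs '<' (evidenceEndId + 1).toNat
  let conclusionEndId := pvFindLoopA cs '>' (conclusionStartId + 1).toNat
  if evidenceStartId = -1 ∨ evidenceEndId = -1 ∨ conclusionStartId = -1 ∨ conclusionEndId = -1 then
    ""
  else
    let evidence := PySem.List.slice cs (some evidenceStartId) (some (evidenceEndId + 1))
    let conclusion := PySem.List.slice cs (some conclusionStartId) (some (conclusionEndId + 1))
    String.ofList ("can we draw the conclusion that ".toList ++ conclusion ++
      " from evidences ".toList ++ evidence ++ "?".toList)

-- ===== PORT B =====
-- first index ≥ i whose character is t (the engine's scan for '[^x]*' + literal x: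
-- the greedy class stops exactly at the first x).
def pvFindIdx? (cs : List Char) (t : Char) (i : Nat) : Option Nat :=
  if h : i < cs.length then
    if cs[i] = t then some i else pvFindIdx? cs t (i + 1)
  else none
termination_by cs.length - i

-- the lazy gap '[\s\S]*?' followed by '<[^>]*>': at each position t try '<' then
-- scan to the first '>'; on failure extend the gap by one character.
def pvGapLoop (cs : List Char) (t : Nat) : Option (Nat × Nat) :=
  if _h : t < cs.length then
    if cs[t] = '<' then
      match pvFindIdx? cs '>' (t + 1) with
      | some m => some (t, m)
      | none => pvGapLoop cs (t + 1)
    else pvGapLoop cs (t + 1)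
  else none
termination_by cs.length - t

-- one attempt of the whole pattern anchored at s: '\[', then '[^\]]*\]', then the gap.
def pvMatchAt (cs : List Char) (s : Nat) : Option (Nat × Nat × Nat × Nat) :=
  if cs[s]? = some '[' then
    match pvFindIdx? cs ']' (s + 1) with
    | some j =>
      match pvGapLoop cs (j + 1) with
      | some (t, m) => some (s, j, t, m)
      | none => none
    | none => none
  else none

-- re.search: try the pattern at every start position, left to right.
def pvSearchLoop (cs : List Char) (s : Nat) : Option (Nat × Nat × Nat × Nat) :=
  if _h : s < cs.length then
    match pvMatchAt cs s with
    | some r => some r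
    | none => pvSearchLoop cs (s + 1)
  else none
termination_by cs.length - s

def transform2verifierformat_alt (output : String) : String :=
  let cs := output.toList
  match pvSearchLoop cs 0 with
  | none => ""
  | some (i, j, t, m) =>
    let evidence := PySem.List.slice cs (some (i : Int)) (some ((j : Int) + 1))
    let conclusion := PySem.List.slice cs (some (t : Int)) (some ((m : Int) + 1))
    String.ofList ("can we draw the conclusion that ".toList ++ conclusion ++
      " from evidences ".toList ++ evidence ++ "?".toList)

-- ===== PRECONDITION & SPEC =====
def Spec_transform2verifierformat (output : String) (out : String) : Prop := out = transform2verifierformat_alt output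
instance (output : String) (out : String) : Decidable (Spec_transform2verifierformat output out) := by unfold Spec_transform2verifierformat; infer_instance

-- ===== CLAIM (what is proved, stated in full; the proofs are below) =====
def Claim_equal_transform2verifierformat : Prop := ∀ (output : String), Dom_transform2verifierformat output → Spec_transform2verifierformat output (transform2verifierformat output)

-- ===== LEMMAS AND PROOFS =====

lemma pvFindIdx?_none_iff (cs : List Char) (t : Char) (i : Nat) :
    pvFindIdx? cs t i = none ↔ ∀ k, i ≤ k → cs[k]? ≠ some t := by
  suffices H : ∀ n i, cs.length - i ≤ n →
      (pvFindIdx? cs t i = none ↔ ∀ k, i ≤ k → cs[k]? ≠ some t) from H (cs.length - i) i le_rfl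
  intro n
  induction n with
  | zero =>
    intro i hi
    rw [pvFindIdx?, dif_neg (by omega)]
    constructor
    · intro _ k hk
      have hk' : cs[k]? = none := List.getElem?_eq_none_iff.mpr (by omega)
      simp [hk']
    · intro _; rfl
  | succ n ih =>
    intro i hi
    rw [pvFindIdx?]
    by_cases h : i < cs.length
    · rw [dif_pos h]
      by_cases hc : cs[i] = t
      · rw [if_pos hc]
        constructor
        · intro hcontra; cases hcontra
        · intro hall
          exact absurd (by rw [List.getElem?_eq_getElem h, hc]) (hall i le_rfl)
      · rw [if_neg hc, ih (i + 1) (by omega)]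
        constructor
        · intro hall k hk
          rcases Nat.eq_or_lt_of_le hk with rfl | hlt'
          · rw [List.getElem?_eq_getElem h]; simp [hc]
          · exact hall k hlt'
        · intro hall k hk; exact hall k (by omega)
    · rw [dif_neg h]
      constructor
      · intro _ k hk
        have hk' : cs[k]? = none := List.getElem?_eq_none_iff.mpr (by omega)
        simp [hk']
      · intro _; rfl

lemma pvFindIdx?_some_iff (cs : List Char) (t : Char) (i k : Nat) :
    pvFindIdx? cs t i = some k ↔
      i ≤ k ∧ cs[k]? = some t ∧ ∀ u, i ≤ u → u < k → cs[u]? ≠ some t := by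
  suffices H : ∀ n i, cs.length - i ≤ n →
      (pvFindIdx? cs t i = some k ↔
        i ≤ k ∧ cs[k]? = some t ∧ ∀ u, i ≤ u → u < k → cs[u]? ≠ some t) from
    H (cs.length - i) i le_rfl
  intro n
  induction n with
  | zero =>
    intro i hi
    rw [pvFindIdx?, dif_neg (by omega)]
    constructor
    · intro hcontra; cases hcontra
    · rintro ⟨hik, hkt, -⟩
      have := (List.getElem?_eq_some_iff.mp hkt).1
      omega
  | succ n ih =>
    intro i hi
    rw [pvFindIdx?]
    by_cases h : i < cs.length
    · rw [dif_pos h]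
      by_cases hc : cs[i] = t
      · rw [if_pos hc]
        constructor
        · intro hs
          obtain rfl : i = k := Option.some.inj hs
          exact ⟨le_rfl, by rw [List.getElem?_eq_getElem h, hc],
            fun u h1 h2 => absurd h1 (by omega)⟩
        · rintro ⟨hik, hkt, hmin⟩
          have hki : ¬ i < k := fun hlt =>
            hmin i le_rfl hlt (by rw [List.getElem?_eq_getElem h, hc])
          have : k = i := by omega
          subst this; rfl
      · rw [if_neg hc, ih (i + 1) (by omega)]
        constructor
        · rintro ⟨h1, h2, h3⟩
          refine ⟨by omega, h2, fun u hu1 hu2 => ?_⟩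
          by_cases hui : u = i
          · subst hui; rw [List.getElem?_eq_getElem h]; simp [hc]
          · exact h3 u (by omega) hu2
        · rintro ⟨h1, h2, h3⟩
          refine ⟨?_, h2, fun u hu1 hu2 => h3 u (by omega) hu2⟩
          rcases Nat.eq_or_lt_of_le h1 with rfl | hlt'
          · exfalso; rw [List.getElem?_eq_getElem h] at h2
            exact hc (Option.some.inj h2)
          · omega
    · rw [dif_neg h]
      constructor
      · intro hcontra; cases hcontra
      · rintro ⟨hik, hkt, -⟩
        have := (List.getElem?_eq_some_iff.mp hkt).1
        omega

lemma pvFindLoopA_eq (cs : List Char) (t : Char) (i : Nat) :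
    pvFindLoopA cs t i = match pvFindIdx? cs t i with
      | some k => (k : Int)
      | none => -1 := by
  suffices H : ∀ n i, cs.length - i ≤ n →
      pvFindLoopA cs t i = (match pvFindIdx? cs t i with
        | some k => (k : Int)
        | none => -1) from H (cs.length - i) i le_rfl
  intro n
  induction n with
  | zero =>
    intro i hi
    rw [pvFindLoopA, pvFindIdx?, dif_neg (by omega), dif_neg (by omega)]
  | succ n ih =>
    intro i hi
    rw [pvFindLoopA, pvFindIdx?]
    by_cases h : i < cs.length
    · rw [dif_pos h, dif_pos h]
      by_cases hc : cs[i] = t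
      · rw [if_pos hc, if_pos hc]
      · rw [if_neg hc, if_neg hc]; exact ih (i + 1) (by omega)
    · rw [dif_neg h, dif_neg h]

lemma pvGapLoop_none (cs : List Char) (t : Nat)
    (h : ∀ u, t ≤ u → cs[u]? = some '<' → pvFindIdx? cs '>' (u + 1) = none) :
    pvGapLoop cs t = none := by
  suffices H : ∀ n t, cs.length - t ≤ n →
      (∀ u, t ≤ u → cs[u]? = some '<' → pvFindIdx? cs '>' (u + 1) = none) →
      pvGapLoop cs t = none from H (cs.length - t) t le_rfl h
  intro n
  induction n with
  | zero =>
    intro t ht _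
    rw [pvGapLoop, dif_neg (by omega)]
  | succ n ih =>
    intro t ht hh
    rw [pvGapLoop]
    by_cases hlt : t < cs.length
    · rw [dif_pos hlt]
      by_cases hc : cs[t] = '<'
      · rw [if_pos hc, hh t le_rfl (by rw [List.getElem?_eq_getElem hlt, hc])]
        exact ih (t + 1) (by omega) (fun u hu => hh u (by omega))
      · rw [if_neg hc]
        exact ih (t + 1) (by omega) (fun u hu => hh u (by omega))
    · rw [dif_neg hlt]

lemma pvGapLoop_some (cs : List Char) (t t0 m : Nat)
    (h1 : pvFindIdx? cs '<' t = some t0)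
    (h2 : pvFindIdx? cs '>' (t0 + 1) = some m) :
    pvGapLoop cs t = some (t0, m) := by
  obtain ⟨hle, hchar, hmin⟩ := (pvFindIdx?_some_iff cs '<' t t0).mp h1
  have ht0 : t0 < cs.length := (List.getElem?_eq_some_iff.mp hchar).1
  have hc0 : cs[t0] = '<' := (List.getElem?_eq_some_iff.mp hchar).2
  suffices H : ∀ n t, t0 - t ≤ n → t ≤ t0 →
      (∀ u, t ≤ u → u < t0 → cs[u]? ≠ some '<') →
      pvGapLoop cs t = some (t0, m) from H t0 t (by omega) hle hmin
  intro n
  induction n with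
  | zero =>
    intro t hn htle _
    obtain rfl : t = t0 := by omega
    rw [pvGapLoop, dif_pos ht0, if_pos hc0, h2]
  | succ n ih =>
    intro t hn htle hmn
    by_cases he : t = t0
    · subst he
      rw [pvGapLoop, dif_pos ht0, if_pos hc0, h2]
    · have htlt : t < t0 := by omega
      have hlt : t < cs.length := by omega
      have hc : ¬ cs[t] = '<' := fun hc =>
        hmn t le_rfl htlt (by rw [List.getElem?_eq_getElem hlt, hc])
      rw [pvGapLoop, dif_pos hlt, if_neg hc]
      exact ih (t + 1) (by omega) (by omega) (fun u hu1 hu2 => hmn u (by omega) hu2)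

lemma pvMatchAt_char (cs : List Char) (s : Nat) (r : Nat × Nat × Nat × Nat)
    (h : pvMatchAt cs s = some r) : cs[s]? = some '[' := by
  by_cases hc : cs[s]? = some '['
  · exact hc
  · rw [pvMatchAt, if_neg hc] at h; cases h

lemma pvSearchLoop_none (cs : List Char) (s : Nat)
    (h : ∀ u, pvMatchAt cs u = none) : pvSearchLoop cs s = none := by
  suffices H : ∀ n s, cs.length - s ≤ n → pvSearchLoop cs s = none from
    H (cs.length - s) s le_rfl
  intro n
  induction n with
  | zero =>
    intro s hs
    rw [pvSearchLoop, dif_neg (by omega)]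
  | succ n ih =>
    intro s hs
    rw [pvSearchLoop]
    by_cases hlt : s < cs.length
    · rw [dif_pos hlt, h s]
      exact ih (s + 1) (by omega)
    · rw [dif_neg hlt]

lemma pvSearchLoop_some (cs : List Char) (s s0 : Nat) (r : Nat × Nat × Nat × Nat)
    (hs : s ≤ s0)
    (h0 : pvMatchAt cs s0 = some r)
    (hlt : ∀ u, u < s0 → pvMatchAt cs u = none) :
    pvSearchLoop cs s = some r := by
  have hs0 : s0 < cs.length :=
    (List.getElem?_eq_some_iff.mp (pvMatchAt_char cs s0 r h0)).1
  suffices H : ∀ n s, s0 - s ≤ n → s ≤ s0 → pvSearchLoop cs s = some r from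
    H (s0 - s) s le_rfl hs
  intro n
  induction n with
  | zero =>
    intro s hn hsle
    obtain rfl : s = s0 := by omega
    rw [pvSearchLoop, dif_pos hs0, h0]
  | succ n ih =>
    intro s hn hsle
    by_cases he : s = s0
    · subst he
      rw [pvSearchLoop, dif_pos hs0, h0]
    · rw [pvSearchLoop, dif_pos (by omega), hlt s (by omega)]
      exact ih (s + 1) (by omega) (by omega)

-- ===== VERDICT (by name: the statement is the Claim_ definition above) =====
theorem transform2verifierformat_spec : Claim_equal_transform2verifierformat := by
  intro output _
  unfold Spec_transform2verifierformat transform2verifierformat transform2verifierformat_alt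
  set cs := output.toList with hcs
  have hcast : ∀ n : Nat, ((n : Int) + 1).toNat = n + 1 := fun n => by omega
  cases he : pvFindIdx? cs '[' 0 with
  | none =>
    have hmatch : ∀ u, pvMatchAt cs u = none := fun u => by
      rw [pvMatchAt, if_neg ((pvFindIdx?_none_iff cs '[' 0).mp he u (Nat.zero_le _))]
    simp only [pvFindLoopA_eq, he, pvSearchLoop_none cs 0 hmatch, true_or, if_true]
  | some s0 =>
    obtain ⟨-, hs0char, hs0min⟩ := (pvFindIdx?_some_iff cs '[' 0 s0).mp he
    cases hj : pvFindIdx? cs ']' (s0 + 1) with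
    | none =>
      have hmatch : ∀ u, pvMatchAt cs u = none := fun u => by
        rw [pvMatchAt]
        by_cases hu : cs[u]? = some '['
        · have hus0 : s0 ≤ u := by
            by_contra h'; exact hs0min u (Nat.zero_le _) (by omega) hu
          rw [if_pos hu,
            (pvFindIdx?_none_iff cs ']' (u + 1)).mpr
              (fun k hk => (pvFindIdx?_none_iff cs ']' (s0 + 1)).mp hj k (by omega))]
        · rw [if_neg hu]
      simp only [pvFindLoopA_eq, he, hcast, hj, pvSearchLoop_none cs 0 hmatch, true_or,
        or_true, if_true]
    | some j0 =>
      obtain ⟨hj0le, hj0char, hj0min⟩ := (pvFindIdx?_some_iff cs ']' (s0 + 1) j0).mp hj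
      cases ht : pvFindIdx? cs '<' (j0 + 1) with
      | none =>
        have hmatch : ∀ u, pvMatchAt cs u = none := fun u => by
          rw [pvMatchAt]
          by_cases hu : cs[u]? = some '['
          · have hus0 : s0 ≤ u := by
              by_contra h'; exact hs0min u (Nat.zero_le _) (by omega) hu
            rw [if_pos hu]
            cases hju : pvFindIdx? cs ']' (u + 1) with
            | none => rfl
            | some j' =>
              obtain ⟨hj'le, hj'char, -⟩ := (pvFindIdx?_some_iff cs ']' (u + 1) j').mp hju
              have hj'ge : j0 ≤ j' := by
                by_contra h'; exact hj0min j' (by omega) (by omega) hj'char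
              simp only [pvGapLoop_none cs (j' + 1)
                (fun v hv hvc =>
                  absurd hvc ((pvFindIdx?_none_iff cs '<' (j0 + 1)).mp ht v (by omega)))]
          · rw [if_neg hu]
        simp only [pvFindLoopA_eq, he, hcast, hj, ht, pvSearchLoop_none cs 0 hmatch, true_or,
          or_true, if_true]
      | some t0 =>
        obtain ⟨ht0le, ht0char, ht0min⟩ := (pvFindIdx?_some_iff cs '<' (j0 + 1) t0).mp ht
        cases hm : pvFindIdx? cs '>' (t0 + 1) with
        | none =>
          have hmatch : ∀ u, pvMatchAt cs u = none := fun u => by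
            rw [pvMatchAt]
            by_cases hu : cs[u]? = some '['
            · have hus0 : s0 ≤ u := by
                by_contra h'; exact hs0min u (Nat.zero_le _) (by omega) hu
              rw [if_pos hu]
              cases hju : pvFindIdx? cs ']' (u + 1) with
              | none => rfl
              | some j' =>
                obtain ⟨hj'le, hj'char, -⟩ := (pvFindIdx?_some_iff cs ']' (u + 1) j').mp hju
                have hj'ge : j0 ≤ j' := by
                  by_contra h'; exact hj0min j' (by omega) (by omega) hj'char
                simp only [pvGapLoop_none cs (j' + 1)
                  (fun v hv hvc => by
                    have hvt0 : t0 ≤ v := by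
                      by_contra h'; exact ht0min v (by omega) (by omega) hvc
                    exact (pvFindIdx?_none_iff cs '>' (v + 1)).mpr
                      (fun k hk => (pvFindIdx?_none_iff cs '>' (t0 + 1)).mp hm k (by omega)))]
            · rw [if_neg hu]
          simp only [pvFindLoopA_eq, he, hcast, hj, ht, hm, pvSearchLoop_none cs 0 hmatch,
            or_true, if_true]
        | some m0 =>
          have hmB : pvMatchAt cs s0 = some (s0, j0, t0, m0) := by
            rw [pvMatchAt, if_pos hs0char, hj]
            simp only [pvGapLoop_some cs (j0 + 1) t0 m0 ht hm]
          have hrun : pvSearchLoop cs 0 = some (s0, j0, t0, m0) :=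
            pvSearchLoop_some cs 0 s0 _ (Nat.zero_le _) hmB
              (fun u hu => by
                rw [pvMatchAt, if_neg (hs0min u (Nat.zero_le _) hu)])
          simp only [pvFindLoopA_eq, he, hcast, hj, ht, hm, hrun]
          have hne : ¬((s0 : Int) = -1 ∨ (j0 : Int) = -1 ∨ (t0 : Int) = -1 ∨ (m0 : Int) = -1) := by
            rintro (h' | h' | h' | h') <;> omega
          rw [if_neg hne]
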